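-- pv_equiv track=rewrite | github.com/aluiziolira/sql-throughput-challenge | src/strategies/async_stream.py | _split_limit_ranges
-- ===== SOURCE A (Python) =====
-- def _split_limit_ranges(limit: int, concurrency: int) -> list[tuple[int, int]]:
--     """Split a limit into ranges for concurrent processing using 0-based indices.
--
--     Returns list of (start_idx, end_idx) tuples where:
--     - start_idx is inclusive (0-based)
--     - end_idx is exclusive
--     - The slice ids[start_idx:end_idx] gives the correct chunk
--     """
--     if limit <= 0:
--         return []
--
--     effective_concurrency = max(1, min(concurrency, limit))
--     base_size, remainder = divmod(limit, effective_concurrency)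
--     ranges: list[tuple[int, int]] = []
--     start_idx = 0
--
--     for index in range(effective_concurrency):
--         chunk_size = base_size + (1 if index < remainder else 0)
--         end_idx = start_idx + chunk_size
--         ranges.append((start_idx, end_idx))
--         start_idx = end_idx
--
--     return ranges
-- ===== SOURCE B (Python) =====
-- def _split_limit_ranges(limit: int, concurrency: int) -> list[tuple[int, int]]:
--     """Split a limit into ranges for concurrent processing using 0-based indices.
--
--     Closed-form boundaries instead of a running accumulator: the i-th boundary
--     of a front-loaded remainder split is base*i + min(i, remainder).
--     """
--     if limit <= 0:
--         return []
--     n = max(1, min(concurrency, limit))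
--     base, rem = divmod(limit, n)
--     bounds = [base * i + min(i, rem) for i in range(n + 1)]
--     return list(zip(bounds, bounds[1:]))
-- ===== Notes on version B (the rewrite author's own statement) =====
-- stated objective: simpler
-- what changed: Replaces the stateful loop carrying start_idx with closed-form boundaries base*i + min(i, remainder) for i in 0..n, paired into ranges by zipping consecutive boundaries.
import Mathlib
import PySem

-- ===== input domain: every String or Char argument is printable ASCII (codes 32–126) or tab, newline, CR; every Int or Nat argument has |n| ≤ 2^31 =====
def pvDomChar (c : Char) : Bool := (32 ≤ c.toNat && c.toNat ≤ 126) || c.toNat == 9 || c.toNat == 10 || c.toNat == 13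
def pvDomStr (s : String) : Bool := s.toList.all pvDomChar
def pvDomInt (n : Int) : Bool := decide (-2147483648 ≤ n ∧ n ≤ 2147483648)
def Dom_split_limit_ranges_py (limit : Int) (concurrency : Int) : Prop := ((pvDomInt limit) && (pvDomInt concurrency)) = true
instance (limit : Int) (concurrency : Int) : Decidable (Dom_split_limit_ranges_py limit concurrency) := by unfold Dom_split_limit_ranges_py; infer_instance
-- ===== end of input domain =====

-- B replaces A's running start_idx accumulator with closed-form boundaries zipped pairwise (objective: simpler).

-- ===== PORT A =====
def split_limit_ranges_py (limit : Int) (concurrency : Int) : List (Int × Int) :=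
  if limit ≤ 0 then []
  else
    let effective_concurrency := max 1 (min concurrency limit)
    let base_size := PySem.Int.floordiv limit effective_concurrency
    let remainder := PySem.Int.mod limit effective_concurrency
    ((PySem.List.pyRange 0 effective_concurrency 1).foldl
      (fun (st : List (Int × Int) × Int) index =>
        let chunk_size := base_size + (if index < remainder then 1 else 0)
        let end_idx := st.2 + chunk_size
        (st.1 ++ [(st.2, end_idx)], end_idx))
      ([], 0)).1

-- ===== PORT B =====
def split_limit_ranges_py_alt (limit : Int) (concurrency : Int) : List (Int × Int) :=
  if limit ≤ 0 then []
  else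
    let n := max 1 (min concurrency limit)
    let base := PySem.Int.floordiv limit n
    let rem := PySem.Int.mod limit n
    let bounds := (PySem.List.pyRange 0 (n + 1) 1).map (fun i => base * i + min i rem)
    bounds.zip (bounds.drop 1)

-- ===== PRECONDITION & SPEC =====
def Spec_split_limit_ranges_py (limit : Int) (concurrency : Int) (out : List (Int × Int)) : Prop := out = split_limit_ranges_py_alt limit concurrency
instance (limit : Int) (concurrency : Int) (out : List (Int × Int)) : Decidable (Spec_split_limit_ranges_py limit concurrency out) := by unfold Spec_split_limit_ranges_py; infer_instance

-- ===== CLAIM (what is proved, stated in full; the proofs are below) =====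
def Claim_equal_split_limit_ranges_py : Prop := ∀ (limit : Int) (concurrency : Int), Dom_split_limit_ranges_py limit concurrency → Spec_split_limit_ranges_py limit concurrency (split_limit_ranges_py limit concurrency)

-- ===== LEMMAS AND PROOFS =====

-- the closed-form boundary function: g k = base*k + min k rem
def pvBound (base rem : Int) (k : Nat) : Int := base * (k : Int) + min (k : Int) rem

lemma pvBound_succ (base rem : Int) (k : Nat) :
    pvBound base rem (k + 1)
      = pvBound base rem k + (base + (if (k : Int) < rem then 1 else 0)) := by
  have hmin : min ((k : Int) + 1) rem = min (k : Int) rem + (if (k : Int) < rem then 1 else 0) := by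
    split_ifs with h <;> omega
  unfold pvBound
  push_cast
  rw [hmin]; ring

lemma pvLoopA (base rem : Int) (hrem : 0 ≤ rem) (m : Nat) :
    (PySem.List.pyRange 0 (m : Int) 1).foldl
      (fun (st : List (Int × Int) × Int) index =>
        let chunk_size := base + (if index < rem then 1 else 0)
        let end_idx := st.2 + chunk_size
        (st.1 ++ [(st.2, end_idx)], end_idx))
      ([], 0)
    = ((List.range m).map (fun k => (pvBound base rem k, pvBound base rem (k + 1))),
       pvBound base rem m) := by
  induction m with
  | zero =>
    simp [PySem.List.pyRange_one_eq_nil, pvBound, hrem]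
  | succ m ih =>
    have hcast : ((m + 1 : Nat) : Int) = (m : Int) + 1 := by push_cast; ring
    rw [hcast, PySem.List.pyRange_one_succ_right (by positivity), List.foldl_append, ih]
    simp only [List.foldl_cons, List.foldl_nil, List.range_succ, List.map_append, List.map_cons,
      List.map_nil]
    refine Prod.ext ?_ ?_
    · simp [pvBound_succ base rem m]
    · simp [pvBound_succ base rem m]

lemma pvZipConsec {α : Type} (m : Nat) (G : Nat → α) :
    ((List.range (m + 1)).map G).zip (((List.range (m + 1)).map G).drop 1)
      = (List.range m).map (fun k => (G k, G (k + 1))) := by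
  apply List.ext_getElem
  · simp
  · intro i h1 h2
    simp

theorem split_limit_ranges_py_eq (limit concurrency : Int) :
    split_limit_ranges_py limit concurrency = split_limit_ranges_py_alt limit concurrency := by
  unfold split_limit_ranges_py split_limit_ranges_py_alt
  by_cases hle : limit ≤ 0
  · simp [hle]
  · simp only [hle, if_false]
    set n := max 1 (min concurrency limit) with hn
    have hnpos : 0 < n := lt_of_lt_of_le one_pos (le_max_left _ _)
    set base := PySem.Int.floordiv limit n with hbase
    set rem := PySem.Int.mod limit n with hrem'
    have hrem : 0 ≤ rem := by
      rw [hrem', PySem.Int.mod_eq_emod_of_pos hnpos]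
      exact Int.emod_nonneg limit (ne_of_gt hnpos)
    set M := n.toNat with hM
    have hMn : (M : Int) = n := Int.toNat_of_nonneg (le_of_lt hnpos)
    -- A side
    rw [← hMn, pvLoopA base rem hrem M]
    -- B side
    have htn : ((M : Int) + 1 - 0).toNat = M + 1 := by omega
    rw [PySem.List.pyRange_one, htn]
    simp only [List.map_map]
    have hG : ((fun i => base * i + min i rem) ∘ fun k : Nat => (0 : Int) + (k : Int))
        = fun k : Nat => pvBound base rem k := by
      funext k; simp [pvBound]
    rw [hG, pvZipConsec M (pvBound base rem)]

-- ===== VERDICT (by name: the statement is the Claim_ definition above) =====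
theorem split_limit_ranges_py_spec : Claim_equal_split_limit_ranges_py := by
  intro limit concurrency _
  unfold Spec_split_limit_ranges_py
  exact split_limit_ranges_py_eq limit concurrency
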